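-- pv_equiv track=rewrite | github.com/pinellolab/CRISPR_Pipeline | bin/flash_base_editing_mapping.py | pack_dna_2bit
-- ===== SOURCE A (Python) =====
-- from typing import Dict, Iterator, List, Optional, Sequence, Tuple
--
-- _DNA2BIT = {"A": 0, "C": 1, "G": 2, "T": 3, "a": 0, "c": 1, "g": 2, "t": 3}
--
-- def pack_dna_2bit(seq: str) -> Optional[int]:
--     packed = 0
--     for char in seq:
--         value = _DNA2BIT.get(char)
--         if value is None:
--             return None
--         packed = (packed << 2) | value
--     return packed
-- ===== SOURCE B (Python) =====
-- _DNA2BIT = {"A": 0, "C": 1, "G": 2, "T": 3, "a": 0, "c": 1, "g": 2, "t": 3}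
--
-- def pack_dna_2bit(seq):
--     if any(c not in _DNA2BIT for c in seq):
--         return None
--     total, weight = 0, 1
--     for c in reversed(seq):
--         total += _DNA2BIT[c] * weight
--         weight *= 4
--     return total
-- ===== Notes on version B (the rewrite author's own statement) =====
-- stated objective: alternative
-- what changed: B first validates the whole string with a membership scan, then accumulates the value back-to-front carrying an explicit positional weight (total += value*weight; weight *= 4), instead of A's single front-to-back shift-and-or fold with an early None return.
import Mathlib
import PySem

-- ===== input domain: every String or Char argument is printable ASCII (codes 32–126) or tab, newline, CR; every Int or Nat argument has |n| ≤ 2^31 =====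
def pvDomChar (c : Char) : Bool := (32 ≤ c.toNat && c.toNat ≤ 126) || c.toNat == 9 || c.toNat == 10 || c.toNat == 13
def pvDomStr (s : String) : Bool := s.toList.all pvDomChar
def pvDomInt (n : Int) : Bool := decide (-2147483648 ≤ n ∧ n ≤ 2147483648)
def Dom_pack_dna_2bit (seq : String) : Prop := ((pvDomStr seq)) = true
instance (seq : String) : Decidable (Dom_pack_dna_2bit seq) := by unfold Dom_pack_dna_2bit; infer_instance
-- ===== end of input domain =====

-- B validates the whole string first, then accumulates back-to-front with an explicit positional
-- weight, instead of A's front-to-back shift-and-or fold with early return; same values everywhere.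

-- module constant _DNA2BIT (shared context of both functions)
def dna2bit : PySem.Dict Char Int :=
  ⟨[('A', 0), ('C', 1), ('G', 2), ('T', 3), ('a', 0), ('c', 1), ('g', 2), ('t', 3)]⟩

-- ===== PORT A =====
-- the for-loop of A: early `return None` on a missing key, else packed = (packed << 2) | value
def packLoopA : List Char → Int → Option Int
  | [], packed => some packed
  | c :: rest, packed =>
    match PySem.Dict.get? dna2bit c with
    | none => none
    | some value => packLoopA rest (PySem.Int.bor (packed <<< (2 : Nat)) value)

def pack_dna_2bit (seq : String) : Option Int := packLoopA seq.toList 0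

-- ===== PORT B =====
-- the reversed for-loop of B, state (total, weight)
def packStepB (st : Int × Int) (c : Char) : Int × Int :=
  (st.1 + PySem.Dict.getD dna2bit c 0 * st.2, st.2 * 4)

def pack_dna_2bit_alt (seq : String) : Option Int :=
  if seq.toList.any (fun c => !(PySem.Dict.get? dna2bit c).isSome) then none
  else some (seq.toList.reverse.foldl packStepB (0, 1)).1

-- ===== PRECONDITION & SPEC =====
def Spec_pack_dna_2bit (seq : String) (out : Option Int) : Prop := out = pack_dna_2bit_alt seq
instance (seq : String) (out : Option Int) : Decidable (Spec_pack_dna_2bit seq out) := by unfold Spec_pack_dna_2bit; infer_instance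

-- ===== CLAIM (what is proved, stated in full; the proofs are below) =====
def Claim_equal_pack_dna_2bit : Prop := ∀ (seq : String), Dom_pack_dna_2bit seq → Spec_pack_dna_2bit seq (pack_dna_2bit seq)

-- ===== LEMMAS AND PROOFS =====

-- reference value: Horner evaluation in base 4 of the (valid) character list
def hornerV (acc : Int) : List Char → Int
  | [] => acc
  | c :: rest => hornerV (4 * acc + PySem.Dict.getD dna2bit c 0) rest

theorem get?_dna2bit_bounds (c : Char) (v : Int)
    (h : PySem.Dict.get? dna2bit c = some v) : 0 ≤ v ∧ v < 4 := by
  simp only [PySem.Dict.get?, dna2bit, List.find?] at h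
  repeat' split at h
  all_goals simp_all
  all_goals omega

theorem shiftor_eq (a v : Int) (ha : 0 ≤ a) (hv0 : 0 ≤ v) (hv4 : v < 4) :
    PySem.Int.bor (a <<< (2 : Nat)) v = 4 * a + v := by
  obtain ⟨m, rfl⟩ := Int.eq_ofNat_of_zero_le ha
  obtain ⟨k, rfl⟩ := Int.eq_ofNat_of_zero_le hv0
  have hcast : ((m : Int) <<< (2 : Nat)) = ((m <<< 2 : Nat) : Int) := by
    simp [Int.shiftLeft_eq, Nat.shiftLeft_eq]
  rw [hcast, PySem.Int.bor_natCast,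
    ← Nat.shiftLeft_add_eq_or_of_lt (by omega : k < 2 ^ 2) m]
  push_cast [Nat.shiftLeft_eq]
  ring

theorem packLoopA_eq_hornerV (cs : List Char) (acc : Int) (hacc : 0 ≤ acc)
    (hv : ∀ c ∈ cs, (PySem.Dict.get? dna2bit c).isSome) :
    packLoopA cs acc = some (hornerV acc cs) := by
  induction cs generalizing acc with
  | nil => rfl
  | cons c rest ih =>
    have hc : (PySem.Dict.get? dna2bit c).isSome := hv c (List.mem_cons_self ..)
    obtain ⟨v, hg⟩ := Option.isSome_iff_exists.mp hc
    obtain ⟨hv0, hv4⟩ := get?_dna2bit_bounds c v hg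
    have hgd : PySem.Dict.getD dna2bit c 0 = v := by simp [PySem.Dict.getD, hg]
    simp only [packLoopA, hg, hornerV, hgd]
    rw [shiftor_eq acc v hacc hv0 hv4]
    exact ih (4 * acc + v) (by omega) (fun x hx => hv x (List.mem_cons_of_mem _ hx))

theorem hornerV_split (acc : Int) (cs : List Char) :
    hornerV acc cs = acc * 4 ^ cs.length + hornerV 0 cs := by
  induction cs generalizing acc with
  | nil => simp [hornerV]
  | cons c rest ih =>
    simp only [hornerV, List.length_cons]
    rw [ih (4 * acc + PySem.Dict.getD dna2bit c 0), ih (4 * 0 + PySem.Dict.getD dna2bit c 0)]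
    ring

theorem foldB_eq (cs : List Char) (t w : Int) :
    cs.reverse.foldl packStepB (t, w) = (t + w * hornerV 0 cs, w * 4 ^ cs.length) := by
  induction cs generalizing t w with
  | nil => simp [hornerV]
  | cons c rest ih =>
    simp only [List.reverse_cons, List.foldl_append, ih, List.foldl_cons, List.foldl_nil,
      packStepB, hornerV, List.length_cons]
    rw [hornerV_split (4 * 0 + PySem.Dict.getD dna2bit c 0) rest]
    simp only [Prod.mk.injEq]
    constructor <;> ring

theorem packLoopA_none (cs : List Char) (acc : Int)
    (h : ∃ c ∈ cs, PySem.Dict.get? dna2bit c = none) : packLoopA cs acc = none := by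
  induction cs generalizing acc with
  | nil => simp at h
  | cons x rest ih =>
    obtain ⟨c, hc, hn⟩ := h
    cases List.mem_cons.mp hc with
    | inl he =>
      subst he
      simp [packLoopA, hn]
    | inr hm =>
      cases hg : PySem.Dict.get? dna2bit x with
      | none => simp [packLoopA, hg]
      | some v =>
        simp only [packLoopA, hg]
        exact ih _ ⟨c, hm, hn⟩

-- ===== VERDICT (by name: the statement is the Claim_ definition above) =====
theorem pack_dna_2bit_spec : Claim_equal_pack_dna_2bit := by
  intro seq _
  unfold Spec_pack_dna_2bit pack_dna_2bit pack_dna_2bit_alt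
  by_cases h : ∀ c ∈ seq.toList, (PySem.Dict.get? dna2bit c).isSome
  · rw [if_neg (by
        simp only [List.any_eq_true, Bool.not_eq_true', Option.isSome_eq_false_iff,
          Option.isNone_iff_eq_none, not_exists, not_and]
        intro x hx
        exact Option.isSome_iff_ne_none.mp (h x hx)),
      packLoopA_eq_hornerV seq.toList 0 le_rfl h, foldB_eq]
    simp
  · push Not at h
    obtain ⟨c, hc, hnone⟩ := h
    rw [if_pos (by
        simp only [List.any_eq_true]
        exact ⟨c, hc, by simp_all⟩)]
    exact packLoopA_none seq.toList 0 ⟨c, hc, by simp_all⟩
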